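-- pv_equiv track=rewrite | github.com/han-so1omon/ElkaControl | ElkaControl/ETP/dataPacket.py | convert_array_wrd_sz
-- ===== SOURCE A (Python) =====
-- import struct, sys, logging, math
--
-- def convert_array_wrd_sz(a, wrd_a_sz, wrd_b_sz):
--     ''' converts array a of word size wrd_a_sz into array b of word size
--         wrd_b_sz '''
--     in_t = int(math.ceil((float(wrd_a_sz)/float(wrd_b_sz))*len(a)))
--
--     b = [0] * in_t
--
--     k = 0
--     for i in range(len(a)):
--         for j in range(wrd_a_sz):
--             b_idx = int(math.floor(k/wrd_b_sz))
--             if j == 0 or (k % wrd_b_sz) == 0: # if at beginning of a[i] or b[i]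
--                 shift = (wrd_a_sz - j) - (wrd_b_sz - (k % wrd_b_sz))
--             mask = 1 << ((wrd_a_sz - 1) - j)
--             if shift >= 0:
--                 b[b_idx] |= (a[i] & mask) >> shift
--             else:
--                 b[b_idx] |= (a[i] & mask) << abs(shift)
--             k += 1
--
--     return b
-- ===== SOURCE B (Python) =====
-- import math
--
-- def convert_array_wrd_sz(a, wrd_a_sz, wrd_b_sz):
--     ''' converts array a of word size wrd_a_sz into array b of word size
--         wrd_b_sz '''
--     in_t = int(math.ceil((float(wrd_a_sz)/float(wrd_b_sz))*len(a)))
--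
--     b = [0] * in_t
--
--     # flatten a into individual bits, MSB first within each word
--     bits = [(w >> (wrd_a_sz - 1 - j)) & 1 for w in a for j in range(wrd_a_sz)]
--
--     # regroup: bit idx goes into word idx//wrd_b_sz at MSB-first position
--     idx = 0
--     for bit in bits:
--         b[idx // wrd_b_sz] |= bit << (wrd_b_sz - 1 - (idx % wrd_b_sz))
--         idx += 1
--
--     return b
-- ===== Notes on version B (the rewrite author's own statement) =====
-- stated objective: simpler
-- what changed: A's fused bit-by-bit pass with a cached `shift` recomputed at word/slot boundaries is replaced by a two-phase build-then-regroup: flatten the input into an explicit MSB-first bit list, then place bit idx into b[idx//wrd_b_sz] at position wrd_b_sz-1-(idx%wrd_b_sz); the same float-based length formula is kept.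
import Mathlib
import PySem

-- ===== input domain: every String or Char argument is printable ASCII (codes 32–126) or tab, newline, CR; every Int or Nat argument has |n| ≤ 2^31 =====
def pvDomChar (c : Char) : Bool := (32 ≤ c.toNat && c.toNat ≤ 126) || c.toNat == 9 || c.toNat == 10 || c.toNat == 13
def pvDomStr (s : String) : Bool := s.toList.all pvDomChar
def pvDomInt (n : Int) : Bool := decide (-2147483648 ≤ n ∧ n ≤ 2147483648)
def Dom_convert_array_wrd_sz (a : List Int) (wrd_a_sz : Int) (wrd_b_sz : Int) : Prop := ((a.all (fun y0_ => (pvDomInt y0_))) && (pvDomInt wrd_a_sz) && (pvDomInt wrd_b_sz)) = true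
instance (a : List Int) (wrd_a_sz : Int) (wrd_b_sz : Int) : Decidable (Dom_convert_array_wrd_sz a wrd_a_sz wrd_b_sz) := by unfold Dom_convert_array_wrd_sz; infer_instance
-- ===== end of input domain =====

-- B replaces A's fused bit-by-bit pass with cached shift bookkeeping by a two-phase
-- build-then-regroup over an explicit bit list (objective: simpler decomposition; not faster).

-- Shared helper: the Python line `int(math.ceil((float(wrd_a_sz)/float(wrd_b_sz))*len(a)))`,
-- identical in both sources, ported by hand (PySem has no floats).
-- pvRnd p q = the IEEE-754 double nearest to p/q (round-to-nearest, ties-to-even), as an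
-- exact rational.  Exact on the whole range reached here (|p|,|q| ≤ 2^84, no overflow or
-- subnormals); cross-checked against CPython floats on randomized inputs.
def pvRnd (p q : Int) : ℚ :=
  if p = 0 then 0 else
  let s : Int := if (decide (p < 0) != decide (q < 0)) then -1 else 1
  let pa := p.natAbs
  let qa := q.natAbs
  -- e = floor(log2(pa/qa)), computed by shifting into a large-integer range first
  let e : Int := ((pa * 2 ^ 200 / qa).log2 : Int) - 200
  let sh : Int := 52 - e
  let num := if 0 ≤ sh then pa * 2 ^ sh.toNat else pa
  let den := if 0 ≤ sh then qa else qa * 2 ^ (-sh).toNat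
  let m0 := num / den
  let r := num % den
  -- round num/den (∈ [2^52, 2^53]) to the nearest integer mantissa, ties to even
  let m : Nat := if den < 2 * r then m0 + 1 else if 2 * r < den then m0 else if m0 % 2 = 1 then m0 + 1 else m0
  if 0 ≤ sh then ((s * m : Int) : ℚ) / ((2 ^ sh.toNat : Nat) : ℚ)
  else ((s * m : Int) : ℚ) * ((2 ^ (-sh).toNat : Nat) : ℚ)

-- in_t = int(math.ceil((float(wrd_a_sz)/float(wrd_b_sz))*len(a))): one float division,
-- one float multiplication (float(len(a)) is exact), then math.ceil.
def pvInT (la wa wb : Int) : Int :=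
  let q := pvRnd wa wb
  (pvRnd (q.num * la) (q.den : Int)).ceil

-- ===== PORT A =====
-- Literal transliteration of A: b = [0]*in_t, then a fused double loop over words i and bit
-- positions j with running bit counter k and the cached `shift` recomputed at word/slot
-- boundaries.  b[b_idx] access/store is pyGetD/pySetD (total forms; Pre_ excludes the raising
-- inputs).  int(math.floor(k/wrd_b_sz)) is floor division, exact for every executable k
-- (|k| < 2^53, float division then floors exactly).  Shift amounts are ≥ 0 whenever the loop
-- body runs (0 ≤ j < wrd_a_sz), so `.toNat` is exact where Python returns.
def convert_array_wrd_sz (a : List Int) (wrd_a_sz : Int) (wrd_b_sz : Int) : List Int :=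
  let in_t := pvInT (PySem.List.len a) wrd_a_sz wrd_b_sz
  let b0 : List Int := List.replicate in_t.toNat 0
  ((PySem.List.pyRange 0 (PySem.List.len a) 1).foldl (fun (st : List Int × Int × Int) i =>
      (PySem.List.pyRange 0 wrd_a_sz 1).foldl (fun (st : List Int × Int × Int) j =>
        let b := st.1
        let k := st.2.1
        let b_idx := PySem.Int.floordiv k wrd_b_sz
        let shift := if j = 0 ∨ PySem.Int.mod k wrd_b_sz = 0 then
            (wrd_a_sz - j) - (wrd_b_sz - PySem.Int.mod k wrd_b_sz) else st.2.2
        let mask : Int := (1 : Int) <<< (wrd_a_sz - 1 - j).toNat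
        let ai := PySem.List.pyGetD a i 0
        let contrib := if 0 ≤ shift then PySem.Int.band ai mask >>> shift.toNat
            else PySem.Int.band ai mask <<< (-shift).toNat
        (PySem.List.pySetD b b_idx (PySem.Int.bor (PySem.List.pyGetD b b_idx 0) contrib),
         k + 1, shift))
      st)
    (b0, 0, 0)).1

-- ===== PORT B =====
-- Literal transliteration of B: same in_t line, then flatten a into the MSB-first bit list,
-- then one pass placing bit idx into word idx//wrd_b_sz at position wrd_b_sz-1-(idx%wrd_b_sz).
def convert_array_wrd_sz_alt (a : List Int) (wrd_a_sz : Int) (wrd_b_sz : Int) : List Int :=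
  let in_t := pvInT (PySem.List.len a) wrd_a_sz wrd_b_sz
  let b0 : List Int := List.replicate in_t.toNat 0
  let bits : List Int := a.flatMap (fun (w : Int) =>
    (PySem.List.pyRange 0 wrd_a_sz 1).map (fun j =>
      PySem.Int.band (w >>> (wrd_a_sz - 1 - j).toNat) 1))
  (bits.foldl (fun (st : List Int × Int) (bit : Int) =>
      let idx := st.2
      let pos := PySem.Int.floordiv idx wrd_b_sz
      (PySem.List.pySetD st.1 pos (PySem.List.pyGetD st.1 pos 0 |> fun cur =>
         PySem.Int.bor cur (bit <<< (wrd_b_sz - 1 - PySem.Int.mod idx wrd_b_sz).toNat)),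
       idx + 1))
    (b0, 0)).1

-- ===== PRECONDITION & SPEC =====
-- Pre_ excludes exactly the inputs where A raises: wrd_b_sz = 0 (ZeroDivisionError in the
-- in_t line) and wrd_b_sz < 0 while the loop body runs at least once (then b = [] and the
-- first b[b_idx] store is an IndexError).
def Pre_convert_array_wrd_sz (a : List Int) (wrd_a_sz : Int) (wrd_b_sz : Int) : Prop :=
  0 < wrd_b_sz ∨ (wrd_b_sz < 0 ∧ (wrd_a_sz ≤ 0 ∨ a = []))
instance (a : List Int) (wrd_a_sz : Int) (wrd_b_sz : Int) : Decidable (Pre_convert_array_wrd_sz a wrd_a_sz wrd_b_sz) := by unfold Pre_convert_array_wrd_sz; infer_instance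

def pvWitness_convert_array_wrd_sz : List Int × Int × Int := ([5, 3], 4, 3)

def Spec_convert_array_wrd_sz (a : List Int) (wrd_a_sz : Int) (wrd_b_sz : Int) (out : List Int) : Prop := out = convert_array_wrd_sz_alt a wrd_a_sz wrd_b_sz
instance (a : List Int) (wrd_a_sz : Int) (wrd_b_sz : Int) (out : List Int) : Decidable (Spec_convert_array_wrd_sz a wrd_a_sz wrd_b_sz out) := by unfold Spec_convert_array_wrd_sz; infer_instance

-- ===== CLAIM (what is proved, stated in full; the proofs are below) =====
def Claim_equal_convert_array_wrd_sz : Prop := ∀ (a : List Int) (wrd_a_sz : Int) (wrd_b_sz : Int), Dom_convert_array_wrd_sz a wrd_a_sz wrd_b_sz → Pre_convert_array_wrd_sz a wrd_a_sz wrd_b_sz → Spec_convert_array_wrd_sz a wrd_a_sz wrd_b_sz (convert_array_wrd_sz a wrd_a_sz wrd_b_sz)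

-- ===== LEMMAS AND PROOFS =====

-- The single-bit value B extracts for word w, bit position j.
def pvBit (wa w j : Int) : Int := PySem.Int.band (w >>> (wa - 1 - j).toNat) 1

-- The store both programs perform for bit value v at global bit counter k.
def pvUpd (wb : Int) (b : List Int) (k v : Int) : List Int :=
  PySem.List.pySetD b (PySem.Int.floordiv k wb)
    (PySem.Int.bor (PySem.List.pyGetD b (PySem.Int.floordiv k wb) 0)
      (v <<< (wb - 1 - PySem.Int.mod k wb).toNat))

-- A's loop body as a named function.
def pvAStep (wa wb : Int) (ai : Int) (st : List Int × Int × Int) (j : Int) : List Int × Int × Int :=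
  let b := st.1
  let k := st.2.1
  let b_idx := PySem.Int.floordiv k wb
  let shift := if j = 0 ∨ PySem.Int.mod k wb = 0 then
      (wa - j) - (wb - PySem.Int.mod k wb) else st.2.2
  let mask : Int := (1 : Int) <<< (wa - 1 - j).toNat
  let contrib := if 0 ≤ shift then PySem.Int.band ai mask >>> shift.toNat
      else PySem.Int.band ai mask <<< (-shift).toNat
  (PySem.List.pySetD b b_idx (PySem.Int.bor (PySem.List.pyGetD b b_idx 0) contrib), k + 1, shift)

-- B's loop body (specialized to the bit of word w at position j).
def pvBStep (wa wb : Int) (w : Int) (st : List Int × Int) (j : Int) : List Int × Int :=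
  (pvUpd wb st.1 st.2 (pvBit wa w j), st.2 + 1)

-- bit extraction: w & (1 << p) = ((w >> p) & 1) << p over Python ints, and the
-- resulting equality of the two shifted contributions
theorem pv_nat_bit (n p : Nat) : n &&& 2 ^ p = ((n >>> p) &&& 1) * 2 ^ p := by
  rw [Nat.and_two_pow, Nat.and_one_is_mod, Nat.shiftRight_eq_div_pow]
  rcases Nat.mod_two_eq_zero_or_one (n / 2 ^ p) with h | h <;>
    simp [Nat.testBit, Nat.shiftRight_eq_div_pow, h]

theorem pv_band_negSucc (m q : Nat) : PySem.Int.band (Int.negSucc m) ((q : Nat) : Int)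
    = ((q - (q &&& m) : Nat) : Int) := by
  have h1 : ¬ (0 ≤ Int.negSucc m) := by simp [Int.negSucc_eq]; omega
  have h2 : (0 : Int) ≤ (q : Int) := by positivity
  simp only [PySem.Int.band, if_neg h1, if_pos h2]
  norm_num

theorem pv_band_two_pow (w : Int) (p : Nat) :
    PySem.Int.band w ((1 : Int) <<< p) = (PySem.Int.band (w >>> p) 1) <<< p := by
  have h2p : ((1 : Int) <<< p) = ((2 ^ p : Nat) : Int) := by
    rw [Int.shiftLeft_eq, one_mul]; push_cast; ring
  have hone : ((1 : Int)) = ((1 : Nat) : Int) := rfl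
  rcases Int.lt_or_le w 0 with hw | hw
  · obtain ⟨n, rfl⟩ : ∃ n : Nat, w = Int.negSucc n := by
      refine ⟨(-w - 1).toNat, ?_⟩
      rw [Int.negSucc_eq]; omega
    rw [h2p, Int.negSucc_shiftRight, hone, pv_band_negSucc, pv_band_negSucc,
      show ((1:Nat)&&&(n>>>p)) = ((n>>>p)&&&1) from Nat.and_comm _ _,
      show ((2^p : Nat)&&&n) = (n&&&(2^p)) from Nat.and_comm _ _, pv_nat_bit,
      Nat.and_one_is_mod, Int.shiftLeft_eq]
    rcases Nat.mod_two_eq_zero_or_one (n >>> p) with h | h <;>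
      · rw [h]; simp
  · obtain ⟨n, rfl⟩ := Int.eq_ofNat_of_zero_le hw
    rw [h2p, PySem.Int.band_natCast, ← Int.natCast_shiftRight, hone,
      PySem.Int.band_natCast, Int.shiftLeft_eq, pv_nat_bit]
    push_cast; ring

theorem pv_contrib_eq (w : Int) (p r : Nat) :
    (if 0 ≤ ((p : Int) - r) then PySem.Int.band w ((1 : Int) <<< p) >>> ((p : Int) - r).toNat
     else PySem.Int.band w ((1 : Int) <<< p) <<< (-((p : Int) - r)).toNat)
    = (PySem.Int.band (w >>> p) 1) <<< r := by
  rw [pv_band_two_pow]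
  set x := PySem.Int.band (w >>> p) 1 with hx
  have hx0 : 0 ≤ x := by
    rw [hx, PySem.Int.band_one]
    exact PySem.Int.mod_nonneg _ (by norm_num)
  split_ifs with h
  · have hrp : r ≤ p := by omega
    have ht : ((p : Int) - r).toNat = p - r := by omega
    rw [ht, Int.shiftLeft_eq, Int.shiftLeft_eq, Int.shiftRight_eq_div_pow,
      show (2:Int)^p = 2^r * 2^(p-r) by rw [← pow_add]; congr 1; omega,
      ← mul_assoc]
    push_cast
    exact Int.mul_ediv_cancel _ (by positivity)
  · have hpr : p ≤ r := by omega
    have ht : (-((p : Int) - r)).toNat = r - p := by omega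
    rw [ht, Int.shiftLeft_eq, Int.shiftLeft_eq, Int.shiftLeft_eq, mul_assoc, ← pow_add]
    congr 2
    omega

-- one word: A's inner loop from any incoming cache equals B's inner loop, up to the cache
theorem pv_pyRange_nil (a b : Int) (h : b ≤ a) : PySem.List.pyRange a b 1 = [] := by
  unfold PySem.List.pyRange
  simp
  omega

theorem pv_inner_eq (wa wb : Int) (hwb : 0 < wb) (w : Int) :
    ∀ (c : Nat) (j0 k : Int) (b : List Int) (s : Int),
      (wa - j0).toNat = c → 0 ≤ j0 →
      (j0 = 0 ∨ PySem.Int.mod k wb = 0 ∨ s = (wa - j0) - (wb - PySem.Int.mod k wb)) →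
      ∃ s', (PySem.List.pyRange j0 wa 1).foldl (pvAStep wa wb w) (b, k, s)
        = (((PySem.List.pyRange j0 wa 1).foldl (pvBStep wa wb w) (b, k)).1,
           ((PySem.List.pyRange j0 wa 1).foldl (pvBStep wa wb w) (b, k)).2, s') := by
  intro c
  induction c with
  | zero =>
    intro j0 k b s hc hj0 H
    rw [pv_pyRange_nil j0 wa (by omega)]
    exact ⟨s, rfl⟩
  | succ c ih =>
    intro j0 k b s hc hj0 H
    have hlt : j0 < wa := by omega
    rw [PySem.List.pyRange_one_cons hlt]
    simp only [List.foldl_cons]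
    have hmodlt := PySem.Int.mod_lt k hwb
    have hmodnn := PySem.Int.mod_nonneg k hwb
    have hshift : (if j0 = 0 ∨ PySem.Int.mod k wb = 0 then
        (wa - j0) - (wb - PySem.Int.mod k wb) else s)
        = (wa - j0) - (wb - PySem.Int.mod k wb) := by
      rcases H with h | h | h
      · simp [h]
      · simp [h]
      · split_ifs <;> simp [h]
    have hstep : pvAStep wa wb w (b, k, s) j0
        = ((pvBStep wa wb w (b, k) j0).1, (pvBStep wa wb w (b, k) j0).2,
           (wa - j0) - (wb - PySem.Int.mod k wb)) := by
      have hpr : (wa - j0) - (wb - PySem.Int.mod k wb)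
          = ((wa - 1 - j0).toNat : Int) - ((wb - 1 - PySem.Int.mod k wb).toNat : Int) := by
        omega
      simp only [pvAStep, pvBStep, pvUpd, pvBit, hshift]
      rw [hpr, pv_contrib_eq]
    rw [hstep]
    have H2 : j0 + 1 = 0 ∨ PySem.Int.mod (k + 1) wb = 0 ∨
        (wa - j0) - (wb - PySem.Int.mod k wb)
          = (wa - (j0 + 1)) - (wb - PySem.Int.mod (k + 1) wb) := by
      by_cases h0 : PySem.Int.mod (k + 1) wb = 0
      · exact Or.inr (Or.inl h0)
      · refine Or.inr (Or.inr ?_)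
        have e1 := PySem.Int.mod_eq_emod_of_pos (a := k) hwb
        have e2 := PySem.Int.mod_eq_emod_of_pos (a := k + 1) hwb
        rw [e1] at hmodnn hmodlt
        rw [e1, e2]
        rw [e2] at h0
        rcases eq_or_lt_of_le (by omega : (1 : Int) ≤ wb) with h1 | h1
        · exact absurd (by rw [← h1, Int.emod_one]) h0
        · have h1w : (1 : Int) % wb = 1 := Int.emod_eq_of_lt (by omega) (by omega)
          have h3 : (k + 1) % wb = (k % wb + 1) % wb := by
            rw [Int.add_emod, h1w]
          by_cases hbd : k % wb + 1 = wb
          · exact absurd (by rw [h3, hbd, Int.emod_self]) h0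
          · have h4 : (k % wb + 1) % wb = k % wb + 1 :=
              Int.emod_eq_of_lt (by omega) (by omega)
            omega
    exact ih (j0 + 1) (k + 1) (pvBStep wa wb w (b, k) j0).1 _ (by omega) (by omega) H2

-- whole run: folding A's word loop over the list equals folding B's word loop
theorem pv_outer_eq (wa wb : Int) (hwb : 0 < wb) :
    ∀ (ws : List Int) (b : List Int) (k s : Int),
      ∃ s', ws.foldl (fun st w => (PySem.List.pyRange 0 wa 1).foldl (pvAStep wa wb w) st) (b, k, s)
        = ((ws.foldl (fun st w => (PySem.List.pyRange 0 wa 1).foldl (pvBStep wa wb w) st) (b, k)).1,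
           (ws.foldl (fun st w => (PySem.List.pyRange 0 wa 1).foldl (pvBStep wa wb w) st) (b, k)).2, s') := by
  intro ws
  induction ws with
  | nil => exact fun b k s => ⟨s, rfl⟩
  | cons w ws ih =>
    intro b k s
    simp only [List.foldl_cons]
    obtain ⟨s1, h1⟩ := pv_inner_eq wa wb hwb w (wa - 0).toNat 0 k b s rfl (by omega)
      (Or.inl rfl)
    rw [h1]
    exact ih _ _ s1

-- ===== VERDICT (by name: the statement is the Claim_ definition above) =====
theorem pv_foldA_map (wa wb : Int) (a : List Int) (init : List Int × Int × Int) :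
    (PySem.List.pyRange 0 (PySem.List.len a) 1).foldl
      (fun st i => (PySem.List.pyRange 0 wa 1).foldl
        (pvAStep wa wb (PySem.List.pyGetD a i 0)) st) init
    = a.foldl (fun st w => (PySem.List.pyRange 0 wa 1).foldl (pvAStep wa wb w) st) init := by
  conv_rhs => rw [← PySem.List.map_pyGetD_pyRange_zero a (0 : Int)]
  rw [List.foldl_map]

theorem pv_foldB_flat (wa wb : Int) (a : List Int) (init : List Int × Int) :
    (a.flatMap (fun w => (PySem.List.pyRange 0 wa 1).map (fun j => pvBit wa w j))).foldl
      (fun st bit => (pvUpd wb st.1 st.2 bit, st.2 + 1)) init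
    = a.foldl (fun st w => (PySem.List.pyRange 0 wa 1).foldl (pvBStep wa wb w) st) init := by
  rw [List.foldl_flatMap]
  simp only [List.foldl_map]
  rfl

theorem convert_array_wrd_sz_spec : Claim_equal_convert_array_wrd_sz := by
  intro a wa wb _ hpre
  unfold Spec_convert_array_wrd_sz
  rcases hpre with hwb | ⟨hwb, hcase⟩
  · have hA : convert_array_wrd_sz a wa wb
        = (a.foldl (fun st w => (PySem.List.pyRange 0 wa 1).foldl (pvAStep wa wb w) st)
            (List.replicate (pvInT (PySem.List.len a) wa wb).toNat 0, 0, 0)).1 :=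
      congrArg Prod.fst (pv_foldA_map wa wb a _)
    have hB : convert_array_wrd_sz_alt a wa wb
        = (a.foldl (fun st w => (PySem.List.pyRange 0 wa 1).foldl (pvBStep wa wb w) st)
            (List.replicate (pvInT (PySem.List.len a) wa wb).toNat 0, 0)).1 :=
      congrArg Prod.fst (pv_foldB_flat wa wb a _)
    obtain ⟨s1, h1⟩ := pv_outer_eq wa wb hwb a
      (List.replicate (pvInT (PySem.List.len a) wa wb).toNat 0) 0 0
    rw [hA, hB, h1]
  · have hr : PySem.List.pyRange 0 wa 1 = [] ∨ a = [] := by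
      rcases hcase with h | h
      · exact Or.inl (pv_pyRange_nil 0 wa h)
      · exact Or.inr h
    rcases hr with hr | rfl
    · unfold convert_array_wrd_sz convert_array_wrd_sz_alt
      rw [hr]
      have hfm : a.flatMap (fun _ => ([] : List Int)) = [] := by
        induction a <;> simp_all
      simp [hfm]
    · rfl
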